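-- pv_equiv track=rewrite | github.com/hesh64/Algos | coderust/sum_up_to_100.py | find_all_sums_to_100
-- ===== SOURCE A (Python) =====
-- def find_all_sums_to_100(input):
--     if len(input) == 0:
--         return 0
--     combo = []
--
--     def helper(start, end, total, stack):
--         if start == end and total == 100:
--             combo.append(''.join(stack))
--             return True
--
--         if start == end:
--             return False
--
--         for k in range(1, end):
--             if start + k > end:
--                 break
--
--             num = int(input[start: start + k])
--
--             stack.append(str(-num))
--             helper(start + k, end, -num + total, stack)
--             stack.pop()
--
--             stack.append('+' + str(num) if len(stack) else str(num))
--             helper(start + k, end, num + total, stack)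
--             stack.pop()
--
--         return combo
--
--     return helper(0, len(input), 0, [])
-- ===== SOURCE B (Python) =====
-- def find_all_sums_to_100(input):
--     # Pure list-returning recursion over suffixes plus a final filter,
--     # instead of A's mutable-stack DFS with a running total.
--     # Return-value note: for input == '' A returns the int 0; excluded by Pre_ (B returns []).
--     n = len(input)
--
--     def rec(s):
--         # all (expression, value) pairs for suffix s; every number sign-prefixed
--         out = []
--         for k in range(1, len(s) + 1):
--             num = int(s[:k])
--             if k == len(s):
--                 out.append((str(-num), -num))
--                 out.append(('+' + str(num), num))
--             else:
--                 rest = rec(s[k:])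
--                 out.extend((str(-num) + e, -num + v) for e, v in rest)
--                 out.extend(('+' + str(num) + e, num + v) for e, v in rest)
--         return out
--
--     res = []
--     for k in range(1, n):
--         num = int(input[:k])
--         rest = rec(input[k:])
--         res.extend((str(-num) + e, -num + v) for e, v in rest)
--         res.extend((str(num) + e, num + v) for e, v in rest)
--     return [e for e, v in res if v == 100]
-- ===== Notes on version B (the rewrite author's own statement) =====
-- stated objective: alternative
-- what changed: A's mutable-stack DFS with a running total that appends joined matches to a shared accumulator is replaced by a pure recursion returning all (expression, value) pairs for each suffix, combined by list extension and filtered for value 100 once at the top.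
-- outside the precondition, e.g. on find_all_sums_to_100(''): A returns 0, B returns []
import Mathlib
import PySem

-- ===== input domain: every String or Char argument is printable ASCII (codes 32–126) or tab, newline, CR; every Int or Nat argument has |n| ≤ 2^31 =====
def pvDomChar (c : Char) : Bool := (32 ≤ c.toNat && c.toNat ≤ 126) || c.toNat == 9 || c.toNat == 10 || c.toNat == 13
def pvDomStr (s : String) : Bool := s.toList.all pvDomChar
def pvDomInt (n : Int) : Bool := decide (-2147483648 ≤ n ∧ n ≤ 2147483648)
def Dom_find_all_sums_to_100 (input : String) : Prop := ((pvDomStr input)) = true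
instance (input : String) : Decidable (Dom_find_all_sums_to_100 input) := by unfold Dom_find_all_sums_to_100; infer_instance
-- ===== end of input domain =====

-- B replaces A's mutable-stack DFS (running total, append-on-hit) by a pure recursion returning
-- all (expression, value) pairs per suffix plus one final filter; alternative decomposition, not faster.


-- ===== PORT A =====
-- int(cs); .getD 0 is reached only where Python raises ValueError, which Pre_ excludes
def pvIntA (cs : List Char) : Int := (PySem.Int.ofChars? cs).getD 0

-- helper(start, end, total, stack): the strings appended to combo by this call, in order.
-- input[start:start+k] is (drop start).take k (indices here are in-range naturals: PySem.List.slice_natCast_add).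
-- pvLoopA is the 'for k in range(1, end)' loop from value k; '1 ≤ k' in its guard is a totality
-- guard only (k starts at 1 and only increases); 'start + k > endd' is the 'break'.
mutual
def pvHelperA (s : List Char) (endd start : Nat) (total : Int) (stack : List (List Char)) : List String :=
  if start = endd ∧ total = 100 then [String.ofList stack.flatten]   -- ''.join(stack)
  else if start = endd then []
  else pvLoopA s endd start total stack 1
termination_by ((endd - start, endd + 2) : Nat × Nat)

def pvLoopA (s : List Char) (endd start : Nat) (total : Int) (stack : List (List Char)) (k : Nat) : List String :=
  if 1 ≤ k ∧ k < endd then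
    if start + k > endd then []
    else
      let num := pvIntA ((s.drop start).take k)
      pvHelperA s endd (start + k) (-num + total) (stack ++ [PySem.Int.toChars (-num)]) ++
      pvHelperA s endd (start + k) (num + total)
        (stack ++ [if stack.length ≠ 0 then '+' :: PySem.Int.toChars num else PySem.Int.toChars num]) ++
      pvLoopA s endd start total stack (k + 1)
  else []
termination_by ((endd - start, endd + 1 - k) : Nat × Nat)
end

def find_all_sums_to_100 (input : String) : List String :=
  if input.toList.length = 0 then []   -- Python A returns the int 0 here (not a list); excluded by Pre_
  else pvHelperA input.toList input.toList.length 0 0 []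

-- ===== PORT B =====
def pvIntB (cs : List Char) : Int := (PySem.Int.ofChars? cs).getD 0

-- rec(s): all (expression, value) pairs for suffix s, every number sign-prefixed.
-- range(1, len(s)+1) is List.range' 1 s.length; s[:k]/s[k:] are take/drop (in-range naturals).
def pvRecB (t : List Char) : List (List Char × Int) :=
  (List.range' 1 t.length).attach.flatMap (fun kh =>
    let k := kh.1
    let num := pvIntB (t.take k)
    if k = t.length then
      [(PySem.Int.toChars (-num), -num), ('+' :: PySem.Int.toChars num, num)]
    else
      let rest := pvRecB (t.drop k)
      rest.map (fun p => (PySem.Int.toChars (-num) ++ p.1, -num + p.2)) ++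
      rest.map (fun p => ('+' :: PySem.Int.toChars num ++ p.1, num + p.2)))
termination_by t.length
decreasing_by
  have hk := kh.2
  simp only [List.mem_range'_1] at hk
  simp only [List.length_drop]
  omega

def find_all_sums_to_100_alt (input : String) : List String :=
  let s := input.toList
  let res := (List.range' 1 (s.length - 1)).flatMap (fun k =>
    let num := pvIntB (s.take k)
    let rest := pvRecB (s.drop k)
    rest.map (fun p => (PySem.Int.toChars (-num) ++ p.1, -num + p.2)) ++
    rest.map (fun p => (PySem.Int.toChars num ++ p.1, num + p.2)))
  (res.filter (fun p => p.2 == 100)).map (fun p => String.ofList p.1)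

-- ===== PRECONDITION & SPEC =====
-- Pre_ excludes exactly: the empty string (Python A returns the int 0, not a list of strings) and
-- strings of length ≥ 2 with a non-digit character (Python A raises ValueError; every single
-- character is parsed by int() on some path, while length-1 strings return [] unparsed).
def Pre_find_all_sums_to_100 (input : String) : Prop :=
  input.toList.length = 1 ∨ (input.toList ≠ [] ∧ input.toList.all Char.isDigit = true)
instance (input : String) : Decidable (Pre_find_all_sums_to_100 input) := by
  unfold Pre_find_all_sums_to_100; infer_instance

def pvWitness_find_all_sums_to_100 : String := "1099"

def Spec_find_all_sums_to_100 (input : String) (out : List String) : Prop := out = find_all_sums_to_100_alt input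
instance (input : String) (out : List String) : Decidable (Spec_find_all_sums_to_100 input out) := by unfold Spec_find_all_sums_to_100; infer_instance

-- ===== CLAIM (what is proved, stated in full; the proofs are below) =====
def Claim_equal_find_all_sums_to_100 : Prop := ∀ (input : String), Dom_find_all_sums_to_100 input → Pre_find_all_sums_to_100 input → Spec_find_all_sums_to_100 input (find_all_sums_to_100 input)

-- ===== LEMMAS AND PROOFS =====

theorem pvIntB_eq (cs : List Char) : pvIntB cs = pvIntA cs := rfl

-- the body of pvRecB's loop, named for the proofs
def pvBodyB (t : List Char) (k : Nat) : List (List Char × Int) :=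
  let num := pvIntA (t.take k)
  if k = t.length then
    [(PySem.Int.toChars (-num), -num), ('+' :: PySem.Int.toChars num, num)]
  else
    let rest := pvRecB (t.drop k)
    rest.map (fun p => (PySem.Int.toChars (-num) ++ p.1, -num + p.2)) ++
    rest.map (fun p => ('+' :: PySem.Int.toChars num ++ p.1, num + p.2))

theorem pvRecB_eq (t : List Char) :
    pvRecB t = (List.range' 1 t.length).flatMap (pvBodyB t) := by
  rw [pvRecB]
  simp only [List.flatMap_subtype, List.unattach_attach]
  rfl

-- pushing B's final filter/map through one 'extend with prefixed pairs' step
theorem pvChunk (rest : List (List Char × Int)) (stack : List (List Char)) (c : List Char)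
    (a total : Int) :
    ((rest.map (fun p => (c ++ p.1, a + p.2))).filter (fun p => total + p.2 == 100)).map
        (fun p => String.ofList (stack.flatten ++ p.1)) =
      ((rest.filter (fun p => (a + total) + p.2 == 100)).map
        (fun p => String.ofList ((stack ++ [c]).flatten ++ p.1))) := by
  rw [List.filter_map, List.map_map]
  have h : ∀ p : List Char × Int, (total + (a + p.2) == 100) = ((a + total) + p.2 == 100) := by
    intro p
    have : total + (a + p.2) = (a + total) + p.2 := by ring
    rw [this]
  simp [Function.comp_def, h, List.flatten_append, List.append_assoc]

-- main invariant: from position 1 ≤ start < |s|, A's loop from k emits exactly B's filtered,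
-- stack-prefixed pairs of the suffix
theorem pvLoop_eq (n : Nat) : ∀ (s : List Char) (start : Nat) (total : Int)
    (stack : List (List Char)) (k : Nat),
    1 ≤ start → start < s.length → 1 ≤ k → stack ≠ [] →
    n = (s.length - start) + (s.length - k) →
    pvLoopA s s.length start total stack k =
      (((List.range' k (s.length - start + 1 - k)).flatMap (pvBodyB (s.drop start))).filter
          (fun p => total + p.2 == 100)).map
        (fun p => String.ofList (stack.flatten ++ p.1)) := by
  induction n using Nat.strong_induction_on with
  | _ n IH =>
  intro s start total stack k h1 h2 h3 h4 hn
  by_cases hk : k ≤ s.length - start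
  · -- loop body runs
    have hklen : k < s.length := by omega
    rw [pvLoopA, if_pos ⟨h3, hklen⟩, if_neg (by omega)]
    have hcount : s.length - start + 1 - k = (s.length - start - k) + 1 := by omega
    rw [hcount, List.range'_succ, List.flatMap_cons, List.filter_append, List.map_append]
    have htail : pvLoopA s s.length start total stack (k + 1) =
        (((List.range' (k + 1) (s.length - start - k)).flatMap (pvBodyB (s.drop start))).filter
            (fun p => total + p.2 == 100)).map
          (fun p => String.ofList (stack.flatten ++ p.1)) := by
      have := IH ((s.length - start) + (s.length - (k + 1))) (by omega) s start total stack (k + 1)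
        h1 h2 (by omega) h4 rfl
      have hc2 : s.length - start + 1 - (k + 1) = s.length - start - k := by omega
      rwa [hc2] at this
    rw [htail]
    have hlen : (s.drop start).length = s.length - start := by simp
    have hstack : stack.length ≠ 0 := by simpa using h4
    set num := pvIntA ((s.drop start).take k) with hnumdef
    by_cases hkm : k = s.length - start
    · -- k takes the whole remainder: start + k = s.length
      have hse : start + k = s.length := by omega
      rw [pvBodyB]
      simp only [hlen, ← hnumdef, if_pos hkm]
      rw [pvHelperA.eq_def, pvHelperA.eq_def]
      have e1 : (total + -num == 100) = decide (-num + total = 100) := by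
        rw [Int.add_comm]; exact Bool.beq_eq_decide_eq _ _
      have e2 : (total + num == 100) = decide (num + total = 100) := by
        rw [Int.add_comm]; exact Bool.beq_eq_decide_eq _ _
      simp only [hse, if_pos hstack, List.filter_cons, List.filter_nil, e1, e2]
      by_cases c1 : -num + total = 100 <;> by_cases c2 : num + total = 100 <;>
        simp [c1, c2, List.flatten_append]
    · -- k < remainder: recurse into the suffix
      have hlt : start + k < s.length := by omega
      have hrec : pvRecB ((s.drop start).drop k) =
          (List.range' 1 (s.length - (start + k))).flatMap (pvBodyB (s.drop (start + k))) := by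
        rw [List.drop_drop, pvRecB_eq]
        simp
      have hA : ∀ (total' : Int) (stack' : List (List Char)), stack' ≠ [] →
          pvHelperA s s.length (start + k) total' stack' =
            ((((List.range' 1 (s.length - (start + k))).flatMap
                (pvBodyB (s.drop (start + k)))).filter (fun p => total' + p.2 == 100)).map
              (fun p => String.ofList (stack'.flatten ++ p.1))) := by
        intro total' stack' hs'
        rw [pvHelperA.eq_def, if_neg (fun h => absurd h.1 (by omega)), if_neg (by omega)]
        have := IH ((s.length - (start + k)) + (s.length - 1)) (by omega) s (start + k) total'
          stack' 1 (by omega) hlt (by omega) hs' rfl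
        have hc3 : s.length - (start + k) + 1 - 1 = s.length - (start + k) := by omega
        rwa [hc3] at this
      rw [pvBodyB]
      simp only [hlen, ← hnumdef, if_neg hkm]
      rw [List.filter_append, List.map_append, pvChunk, pvChunk, hrec, if_pos hstack]
      rw [hA (-num + total) (stack ++ [PySem.Int.toChars (-num)]) (by simp),
        hA (num + total) (stack ++ ['+' :: PySem.Int.toChars num]) (by simp)]
  · -- loop is over (break / range exhausted)
    rw [pvLoopA]
    have hc : s.length - start + 1 - k = 0 := by omega
    rw [hc]
    by_cases g1 : 1 ≤ k ∧ k < s.length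
    · rw [if_pos g1, if_pos (by omega : start + k > s.length)]; simp
    · rw [if_neg g1]; simp

-- the top-level loop (start = 0, total = 0, empty stack, first number unsigned)
theorem pvTop_eq (n : Nat) : ∀ (s : List Char) (k : Nat), 1 ≤ k → n = s.length - k →
    pvLoopA s s.length 0 0 [] k =
      (((List.range' k (s.length - k)).flatMap (fun k =>
          (pvRecB (s.drop k)).map
            (fun p => (PySem.Int.toChars (-pvIntA (s.take k)) ++ p.1, -pvIntA (s.take k) + p.2)) ++
          (pvRecB (s.drop k)).map
            (fun p => (PySem.Int.toChars (pvIntA (s.take k)) ++ p.1, pvIntA (s.take k) + p.2)))).filter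
          (fun p => (0 : Int) + p.2 == 100)).map
        (fun p => String.ofList (([] : List (List Char)).flatten ++ p.1)) := by
  induction n using Nat.strong_induction_on with
  | _ n IH =>
  intro s k h3 hn
  by_cases hkl : k < s.length
  · rw [pvLoopA, if_pos ⟨h3, hkl⟩, if_neg (by omega)]
    simp only [Nat.zero_add, List.drop_zero]
    have hcount : s.length - k = (s.length - (k + 1)) + 1 := by omega
    rw [hcount, List.range'_succ, List.flatMap_cons, List.filter_append, List.map_append]
    have htail := IH (s.length - (k + 1)) (by omega) s (k + 1) (by omega) rfl
    rw [htail]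
    have hA : ∀ (total' : Int) (stack' : List (List Char)), stack' ≠ [] →
        pvHelperA s s.length k total' stack' =
          ((((List.range' 1 (s.length - k)).flatMap (pvBodyB (s.drop k))).filter
              (fun p => total' + p.2 == 100)).map
            (fun p => String.ofList (stack'.flatten ++ p.1))) := by
      intro total' stack' hs'
      rw [pvHelperA.eq_def, if_neg (fun h => absurd h.1 (by omega)), if_neg (by omega)]
      have := pvLoop_eq ((s.length - k) + (s.length - 1)) s k total' stack' 1
        (by omega) hkl (by omega) hs' rfl
      have hc3 : s.length - k + 1 - 1 = s.length - k := by omega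
      rwa [hc3] at this
    rw [List.filter_append, List.map_append, pvChunk, pvChunk]
    have hrec : pvRecB (s.drop k) =
        (List.range' 1 (s.length - k)).flatMap (pvBodyB (s.drop k)) := by
      rw [pvRecB_eq]; simp
    rw [hrec]
    rw [if_neg (by simp : ¬ (([] : List (List Char)).length ≠ 0))]
    rw [hA (-pvIntA (s.take k) + 0) ([] ++ [PySem.Int.toChars (-pvIntA (s.take k))]) (by simp),
      hA (pvIntA (s.take k) + 0) ([] ++ [PySem.Int.toChars (pvIntA (s.take k))]) (by simp)]
  · rw [pvLoopA]
    have hc : s.length - k = 0 := by omega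
    rw [hc]
    by_cases g1 : 1 ≤ k ∧ k < s.length
    · exact absurd g1.2 hkl
    · rw [if_neg g1]; simp

-- ===== VERDICT (by name: the statement is the Claim_ definition above) =====
theorem find_all_sums_to_100_spec : Claim_equal_find_all_sums_to_100 := by
  intro input _ hpre
  unfold Spec_find_all_sums_to_100
  have hlen0 : ¬ input.toList.length = 0 := by
    rcases hpre with h | ⟨hne, -⟩
    · omega
    · simpa using hne
  rw [find_all_sums_to_100, if_neg hlen0, pvHelperA.eq_def,
    if_neg (fun h => by exact absurd h.2 (by norm_num)), if_neg (fun h => hlen0 h.symm)]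
  rw [pvTop_eq (input.toList.length - 1) input.toList 1 (le_refl 1) rfl]
  simp only [find_all_sums_to_100_alt, pvIntB_eq, zero_add, List.flatten_nil, List.nil_append]
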